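-- pv_equiv track=rewrite | github.com/AdrianDeAnda/Advent2018 | Day21/main.py | register_0
-- ===== SOURCE A (Python) =====
-- def register_0(number, is_part_1):
--     seen = set()
--     c = 0
--     last_unique_c = -1
--
--     while True:
--         a = c | 65536
--         c = number
--
--         while True:
--             c = (((c + (a & 255)) & 16777215) * 65899) & 16777215
--
--             if 256 > a:
--                 if is_part_1:
--                     return c
--                 else:
--                     if c not in seen:
--                         seen.add(c)
--                         last_unique_c = c
--                         break
--                     else:
--                         return last_unique_c
--             else:
--                 a //= 256
-- ===== SOURCE B (Python) =====
-- def _f(c, number):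
--     # one step of the generator: fold the three bytes of a = c | 65536
--     a = c | 65536
--     x = number
--     for _ in range(3):
--         x = (((x + (a & 255)) & 16777215) * 65899) & 16777215
--         a >>= 8
--     return x
--
--
-- def register_0(number, is_part_1):
--     if is_part_1:
--         return _f(0, number)
--     # Part 2 by Floyd cycle detection on the orbit of 0 under _f (O(1) memory,
--     # no seen set).  The first value to repeat is c_{max(mu,1)+lam}; the answer
--     # (A's last_unique_c) is the value generated just before it.
--     tort = _f(0, number)
--     hare = _f(tort, number)
--     while tort != hare:
--         tort = _f(tort, number)
--         hare = _f(_f(hare, number), number)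
--     # preperiod mu: advance c_i and c_{k+i} together until they meet
--     mu = 0
--     x = 0
--     while x != hare:
--         x = _f(x, number)
--         hare = _f(hare, number)
--         mu += 1
--     # period lam: walk the cycle once
--     lam = 1
--     y = _f(x, number)
--     while y != x:
--         y = _f(y, number)
--         lam += 1
--     steps = max(mu, 1) + lam - 1
--     c = 0
--     for _ in range(steps):
--         c = _f(c, number)
--     return c
-- ===== Notes on version B (the rewrite author's own statement) =====
-- stated objective: alternative
-- what changed: Part 2's seen-set first-repeat loop is replaced by Floyd's tortoise-and-hare cycle detection: B finds the preperiod mu and period lam of the orbit of 0 under the step function with O(1) memory and no set, then returns the iterate at index max(mu,1)+lam-1, the value generated just before the first repeat.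
import Mathlib
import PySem

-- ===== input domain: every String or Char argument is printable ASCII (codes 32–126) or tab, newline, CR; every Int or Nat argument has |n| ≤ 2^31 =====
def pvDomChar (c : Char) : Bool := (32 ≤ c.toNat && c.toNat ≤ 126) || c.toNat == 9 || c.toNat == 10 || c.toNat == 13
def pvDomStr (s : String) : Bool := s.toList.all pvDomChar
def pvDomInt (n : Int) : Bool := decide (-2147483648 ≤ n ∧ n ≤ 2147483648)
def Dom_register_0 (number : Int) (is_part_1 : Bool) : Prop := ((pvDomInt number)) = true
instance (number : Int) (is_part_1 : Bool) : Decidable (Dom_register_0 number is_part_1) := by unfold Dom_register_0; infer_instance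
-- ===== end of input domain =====

-- B replaces A's seen-set first-repeat search by Floyd tortoise-and-hare cycle detection
-- (find the preperiod and period of the orbit of 0, then take the iterate just before the
-- first repeat); objective: alternative algorithm (O(1) memory, no set).
-- The loop ports carry a fuel counter that only makes the same computations total: the orbit
-- lives in [0, 2^24), so all the searched indices are at most 2^24 + 1 = 16777217.

-- ===== PORT A =====
-- inner `while True:` of A, recursing on a; returns c's value at the moment the loop exits
def registerInnerA (a c : Int) : Int :=
  let c' := PySem.Int.band (PySem.Int.band (c + PySem.Int.band a 255) 16777215 * 65899) 16777215
  if 256 > a then c'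
  else registerInnerA (PySem.Int.floordiv a 256) c'
termination_by a.toNat
decreasing_by
  rw [PySem.Int.floordiv_eq_ediv_of_pos (by norm_num : (0:Int) < 256)]
  omega

-- outer `while True:` of A over (seen, c, last_unique_c), with fuel
def registerOuterA (number : Int) (is_part_1 : Bool) : Nat → PySem.Set Int → Int → Int → Int
  | 0, _, _, last_unique_c => last_unique_c
  | fuel + 1, seen, c, last_unique_c =>
    let a := PySem.Int.bor c 65536
    let c' := registerInnerA a number
    if is_part_1 then c'
    else if !(PySem.Set.contains seen c') then
      registerOuterA number is_part_1 fuel (PySem.Set.add seen c') c' c'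
    else last_unique_c

def register_0 (number : Int) (is_part_1 : Bool) : Int :=
  registerOuterA number is_part_1 16777217 PySem.Set.empty 0 (-1)

-- ===== PORT B =====
-- _f: one generator step — fold the three bytes of a = c | 65536 starting from number
def registerAdvanceB (c number : Int) : Int :=
  ((List.range 3).foldl
    (fun (s : Int × Int) _ =>
      (PySem.Int.band (PySem.Int.band (s.1 + PySem.Int.band s.2 255) 16777215 * 65899) 16777215,
       s.2 >>> (8 : Nat)))
    (number, PySem.Int.bor c 65536)).1

-- `while tort != hare:` (tortoise one step, hare two), with fuel; returns the meet value
def floydMeet (number : Int) : Nat → Int → Int → Int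
  | 0, tort, _ => tort
  | fuel + 1, tort, hare =>
    if tort = hare then tort
    else floydMeet number fuel (registerAdvanceB tort number)
      (registerAdvanceB (registerAdvanceB hare number) number)

-- `while x != hare:` preperiod search, with fuel; returns (x, mu)
def floydMu (number : Int) : Nat → Int → Int → Nat → Int × Nat
  | 0, x, _, mu => (x, mu)
  | fuel + 1, x, hare, mu =>
    if x = hare then (x, mu)
    else floydMu number fuel (registerAdvanceB x number) (registerAdvanceB hare number) (mu + 1)

-- `while y != x:` period count, with fuel; returns lam
def floydLam (number : Int) : Nat → Int → Int → Nat → Nat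
  | 0, _, _, lam => lam
  | fuel + 1, y, x, lam =>
    if y = x then lam
    else floydLam number fuel (registerAdvanceB y number) x (lam + 1)

def register_0_alt (number : Int) (is_part_1 : Bool) : Int :=
  if is_part_1 then registerAdvanceB 0 number
  else
    let tort := registerAdvanceB 0 number
    let hare := registerAdvanceB tort number
    let meet := floydMeet number 16777217 tort hare
    let p := floydMu number 16777217 0 meet 0
    let lam := floydLam number 16777217 (registerAdvanceB p.1 number) p.1 1
    let steps := max p.2 1 + lam - 1
    (fun c => registerAdvanceB c number)^[steps] 0

-- ===== PRECONDITION & SPEC =====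
def Spec_register_0 (number : Int) (is_part_1 : Bool) (out : Int) : Prop := out = register_0_alt number is_part_1
instance (number : Int) (is_part_1 : Bool) (out : Int) : Decidable (Spec_register_0 number is_part_1 out) := by unfold Spec_register_0; infer_instance

-- ===== CLAIM (what is proved, stated in full; the proofs are below) =====
def Claim_equal_register_0 : Prop := ∀ (number : Int) (is_part_1 : Bool), Dom_register_0 number is_part_1 → Spec_register_0 number is_part_1 (register_0 number is_part_1)

-- ===== LEMMAS AND PROOFS =====

-- the orbit of 0 under one generator step
def pvSeq (number : Int) : Nat → Int
  | 0 => 0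
  | n + 1 => registerAdvanceB (pvSeq number n) number

-- there is a repeat among the values pvSeq 1, pvSeq 2, … at index n
def pvRepAt (number : Int) (n : Nat) : Prop :=
  ∃ j, j < n ∧ 1 ≤ j ∧ pvSeq number j = pvSeq number n

-- x & 0xFFFFFF is a 24-bit value, whatever the sign of x
theorem band_mask_bounds (x : Int) :
    0 ≤ PySem.Int.band x 16777215 ∧ PySem.Int.band x 16777215 < 16777216 := by
  unfold PySem.Int.band
  split_ifs with h1 h2 h2
  · have := Nat.and_le_right (n := x.toNat) (m := (16777215 : Int).toNat)
    constructor <;> [positivity; omega]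
  · norm_num at h2
  · have : (16777215 : Int).toNat - ((16777215 : Int).toNat &&& (-x - 1).toNat) ≤ 16777215 := by omega
    constructor <;> [positivity; omega]
  · norm_num at h2

-- A's inner reduction always exits with a masked (24-bit) value
theorem registerInnerA_bounds (a c : Int) :
    0 ≤ registerInnerA a c ∧ registerInnerA a c < 16777216 := by
  fun_induction registerInnerA a c with
  | case1 a c c' h => exact band_mask_bounds _
  | case2 a c c' h ih => exact ih

-- on a 24-bit c, A's inner loop on c | 65536 runs exactly the three byte steps of B's helper
theorem advance_eq (c number : Int) (h0 : 0 ≤ c) (h1 : c < 16777216) :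
    registerInnerA (PySem.Int.bor c 65536) number = registerAdvanceB c number := by
  have hbor : PySem.Int.bor c 65536 = ((c.toNat ||| 65536 : Nat) : Int) := by
    simpa using PySem.Int.bor_of_nonneg h0 (by norm_num)
  have hlo : (65536 : Int) ≤ PySem.Int.bor c 65536 := by
    rw [hbor]
    have h : (65536 : Nat) ≤ c.toNat ||| 65536 := by
      rw [Nat.or_comm]; exact Nat.left_le_or
    exact_mod_cast h
  have hhi : PySem.Int.bor c 65536 < 16777216 := by
    rw [hbor]
    have : c.toNat ||| 65536 < 2 ^ 24 := Nat.or_lt_two_pow (by omega) (by norm_num)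
    exact_mod_cast this
  set a := PySem.Int.bor c 65536 with ha
  have hd1 : PySem.Int.floordiv a 256 = a / 256 :=
    PySem.Int.floordiv_eq_ediv_of_pos (by norm_num)
  have hd2 : PySem.Int.floordiv (a / 256) 256 = a / 256 / 256 :=
    PySem.Int.floordiv_eq_ediv_of_pos (by norm_num)
  have hs : ∀ b : Int, b >>> (8 : Nat) = b / 256 := fun b => Int.shiftRight_eq_div_pow b 8
  rw [registerInnerA, if_neg (by omega), hd1,
      registerInnerA, if_neg (by omega), hd2,
      registerInnerA, if_pos (by omega)]
  simp [registerAdvanceB, List.range_succ, hs, ← ha]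

-- every orbit value is a 24-bit value
theorem pvSeq_bounds (number : Int) : ∀ n, 0 ≤ pvSeq number n ∧ pvSeq number n < 16777216 := by
  intro n
  induction n with
  | zero => norm_num [pvSeq]
  | succ n ih =>
    have h := advance_eq (pvSeq number n) number ih.1 ih.2
    have := registerInnerA_bounds (PySem.Int.bor (pvSeq number n) 65536) number
    simpa [pvSeq, h] using this

-- one step of the orbit
theorem pvStep (number : Int) (n : Nat) :
    registerAdvanceB (pvSeq number n) number = pvSeq number (n + 1) := rfl

-- the orbit is the iterate of the step function
theorem pvSeq_iterate (number : Int) (n : Nat) :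
    pvSeq number n = (fun c => registerAdvanceB c number)^[n] 0 := by
  induction n with
  | zero => rfl
  | succ n ih => rw [Function.iterate_succ_apply', ← ih]; rfl

-- a coincidence propagates forward
theorem pvShift (number : Int) {a b : Nat} (h : pvSeq number a = pvSeq number b) :
    ∀ t, pvSeq number (a + t) = pvSeq number (b + t) := by
  intro t
  induction t with
  | zero => simpa using h
  | succ t ih =>
    have : pvSeq number (a + t + 1) = pvSeq number (b + t + 1) := by
      rw [← pvStep, ← pvStep, ih]
    simpa [Nat.add_assoc] using this

-- a coincidence at distance p makes the orbit p-periodic from there on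
theorem pvPeriodic (number : Int) {i p : Nat} (h : pvSeq number i = pvSeq number (i + p)) :
    ∀ s a, i ≤ a → pvSeq number a = pvSeq number (a + s * p) := by
  intro s
  induction s with
  | zero => simp
  | succ s ih =>
    intro a ha
    have h1 := ih a ha
    have h2 : pvSeq number (a + s * p) = pvSeq number (a + s * p + p) := by
      have := pvShift number h (a + s * p - i)
      have e1 : i + (a + s * p - i) = a + s * p := by omega
      have e2 : i + p + (a + s * p - i) = a + s * p + p := by omega
      rwa [e1, e2] at this
    rw [h1, h2]
    congr 1
    ring

-- pigeonhole: the 24-bit orbit collides within 16777217 steps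
theorem pvCollision (number : Int) :
    ∃ i j, 1 ≤ i ∧ i < j ∧ j ≤ 16777217 ∧ pvSeq number i = pvSeq number j := by
  have hcard : Fintype.card (Fin 16777216) < Fintype.card (Fin 16777217) := by simp
  obtain ⟨a, b, hne, heq⟩ := Fintype.exists_ne_map_eq_of_card_lt
    (fun t : Fin 16777217 => (⟨(pvSeq number (t.1 + 1)).toNat, by
      have := pvSeq_bounds number (t.1 + 1); omega⟩ : Fin 16777216)) hcard
  have hval : (pvSeq number (a.1 + 1)).toNat = (pvSeq number (b.1 + 1)).toNat := by
    simpa using congrArg Fin.val heq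
  have hseq : pvSeq number (a.1 + 1) = pvSeq number (b.1 + 1) := by
    have ha := pvSeq_bounds number (a.1 + 1)
    have hb := pvSeq_bounds number (b.1 + 1)
    omega
  rcases Nat.lt_or_ge a.1 b.1 with hlt | hge
  · exact ⟨a.1 + 1, b.1 + 1, by omega, by omega, by have := b.2; omega, hseq⟩
  · have hlt : b.1 < a.1 := by
      rcases Nat.lt_or_ge b.1 a.1 with h | h
      · exact h
      · exact absurd (Fin.ext (by omega)) hne
    exact ⟨b.1 + 1, a.1 + 1, by omega, by omega, by have := a.2; omega, hseq.symm⟩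

-- characterization of A's outer loop: it returns the orbit value just before the first repeat
theorem pvOuterChar (number : Int) (r : Nat)
    (hr : pvRepAt number r) (hrmin : ∀ n, n < r → ¬ pvRepAt number n) :
    ∀ (fuel t : Nat) (seen : PySem.Set Int) (last : Int),
    (∀ x : Int, x ∈ seen ↔ ∃ j, 1 ≤ j ∧ j ≤ t ∧ pvSeq number j = x) →
    (1 ≤ t → last = pvSeq number t) →
    t < r → r ≤ t + fuel →
    registerOuterA number false fuel seen (pvSeq number t) last = pvSeq number (r - 1) := by
  intro fuel
  induction fuel with
  | zero => intro t seen last _ _ h1 h2; omega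
  | succ fuel ih =>
    intro t seen last hseen hlast htr hrf
    have hb := pvSeq_bounds number t
    have hc' : registerInnerA (PySem.Int.bor (pvSeq number t) 65536) number
        = pvSeq number (t + 1) := by
      rw [advance_eq _ _ hb.1 hb.2]; rfl
    simp only [registerOuterA, Bool.false_eq_true, if_false, hc']
    by_cases hmem : PySem.Set.contains seen (pvSeq number (t + 1)) = true
    · -- repeat found: r = t + 1, return last = pvSeq (r-1)
      have hx : ∃ j, 1 ≤ j ∧ j ≤ t ∧ pvSeq number j = pvSeq number (t + 1) :=
        (hseen _).1 ((PySem.Set.contains_iff _ _).mp hmem)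
      obtain ⟨j, hj1, hj2, hj3⟩ := hx
      have hrep : pvRepAt number (t + 1) := ⟨j, by omega, hj1, hj3⟩
      have : ¬ (t + 1 < r) := fun h => hrmin _ h hrep
      have hrt : r = t + 1 := by omega
      rw [hmem]
      simp only [Bool.not_true, Bool.false_eq_true, if_false]
      rw [hlast (by omega)]
      congr 1
      omega
    · -- no repeat yet: step
      have hnrep : ¬ pvRepAt number (t + 1) := by
        rintro ⟨j, hj1, hj2, hj3⟩
        exact hmem ((PySem.Set.contains_iff _ _).mpr ((hseen _).2 ⟨j, hj2, by omega, hj3⟩))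
      have hne : r ≠ t + 1 := fun h => hnrep (h ▸ hr)
      rw [Bool.not_eq_true] at hmem
      simp only [hmem, Bool.not_false, if_true]
      exact ih (t + 1) _ _
        (by
          intro x
          rw [PySem.Set.mem_add, hseen x]
          constructor
          · rintro (⟨j, h1, h2, h3⟩ | h)
            · exact ⟨j, h1, by omega, h3⟩
            · exact ⟨t + 1, by omega, le_refl _, h.symm⟩
          · rintro ⟨j, h1, h2, h3⟩
            rcases Nat.lt_or_ge j (t + 1) with h | h
            · exact Or.inl ⟨j, h1, by omega, h3⟩
            · exact Or.inr (by rw [← h3]; congr 1; omega))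
        (fun _ => rfl) (by omega) (by omega)

-- characterization of the meet loop: it returns pvSeq K, K the least k ≥ 1 with c_k = c_{2k}
theorem pvMeetChar (number : Int) (K : Nat)
    (hK : 1 ≤ K ∧ pvSeq number K = pvSeq number (2 * K))
    (hKmin : ∀ k, k < K → ¬ (1 ≤ k ∧ pvSeq number k = pvSeq number (2 * k))) :
    ∀ (fuel t : Nat), 1 ≤ t → t ≤ K → K ≤ t + fuel →
    floydMeet number fuel (pvSeq number t) (pvSeq number (2 * t)) = pvSeq number K := by
  intro fuel
  induction fuel with
  | zero =>
    intro t h1 h2 h3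
    have ht : t = K := by omega
    subst ht
    rfl
  | succ fuel ih =>
    intro t h1 h2 h3
    rw [floydMeet]
    by_cases heq : pvSeq number t = pvSeq number (2 * t)
    · have hnlt : ¬ (t < K) := fun h => hKmin t h ⟨h1, heq⟩
      have ht : t = K := by omega
      subst ht
      rw [if_pos heq]
    · rw [if_neg heq, pvStep, pvStep, pvStep]
      have h2K : 2 * t + 1 + 1 = 2 * (t + 1) := by ring
      rw [h2K]
      have htK : t < K := by
        by_contra hcon
        have he : t = K := by omega
        subst he
        exact heq hK.2
      exact ih (t + 1) (by omega) (by omega) (by omega)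

-- characterization of the preperiod loop
theorem pvMuChar (number : Int) (K M : Nat)
    (hM : pvSeq number M = pvSeq number (K + M))
    (hMmin : ∀ m, m < M → ¬ pvSeq number m = pvSeq number (K + m)) :
    ∀ (fuel i : Nat), i ≤ M → M ≤ i + fuel →
    floydMu number fuel (pvSeq number i) (pvSeq number (K + i)) i = (pvSeq number M, M) := by
  intro fuel
  induction fuel with
  | zero =>
    intro i h1 h2
    have hi : i = M := by omega
    subst hi
    rfl
  | succ fuel ih =>
    intro i h1 h2
    rw [floydMu]
    by_cases heq : pvSeq number i = pvSeq number (K + i)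
    · have hnlt : ¬ (i < M) := fun h => hMmin i h heq
      have hi : i = M := by omega
      subst hi
      rw [if_pos heq]
    · rw [if_neg heq, pvStep, pvStep]
      have hiM : i < M := by
        by_contra hcon
        have he : i = M := by omega
        subst he
        exact heq hM
      have e : K + i + 1 = K + (i + 1) := by omega
      rw [e]
      exact ih (i + 1) (by omega) (by omega)

-- characterization of the period loop
theorem pvLamChar (number : Int) (M L : Nat)
    (hL : 1 ≤ L ∧ pvSeq number (M + L) = pvSeq number M)
    (hLmin : ∀ l, l < L → ¬ (1 ≤ l ∧ pvSeq number (M + l) = pvSeq number M)) :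
    ∀ (fuel j : Nat), 1 ≤ j → j ≤ L → L ≤ j + fuel →
    floydLam number fuel (pvSeq number (M + j)) (pvSeq number M) j = L := by
  intro fuel
  induction fuel with
  | zero =>
    intro j h1 h2 h3
    have hj : j = L := by omega
    subst hj
    rfl
  | succ fuel ih =>
    intro j h1 h2 h3
    rw [floydLam]
    by_cases heq : pvSeq number (M + j) = pvSeq number M
    · have hnlt : ¬ (j < L) := fun h => hLmin j h ⟨h1, heq⟩
      have hj : j = L := by omega
      subst hj
      rw [if_pos heq]
    · rw [if_neg heq, pvStep]
      have hjL : j < L := by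
        by_contra hcon
        have he : j = L := by omega
        subst he
        exact heq hL.2
      have e : M + j + 1 = M + (j + 1) := by omega
      rw [e]
      exact ih (j + 1) (by omega) (by omega) (by omega)

-- the L values along one period starting at M are pairwise distinct
theorem pvCycleDistinct (number : Int) (M L : Nat)
    (hL : 1 ≤ L ∧ pvSeq number (M + L) = pvSeq number M)
    (hLmin : ∀ l, l < L → ¬ (1 ≤ l ∧ pvSeq number (M + l) = pvSeq number M)) :
    ∀ a b, a < b → b < L → pvSeq number (M + a) ≠ pvSeq number (M + b) := by
  intro a b hab hbL heq
  have h := pvShift number heq (L - b)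
  have e1 : M + a + (L - b) = M + (a + (L - b)) := by omega
  have e2 : M + b + (L - b) = M + L := by omega
  rw [e1, e2, hL.2] at h
  exact hLmin (a + (L - b)) (by omega) ⟨by omega, h⟩

-- values strictly before the preperiod never recur
theorem pvTailDistinct (number : Int) (K M : Nat)
    (hM : pvSeq number M = pvSeq number (K + M))
    (hMmin : ∀ m, m < M → ¬ pvSeq number m = pvSeq number (K + m)) :
    ∀ u v, u < M → u < v → pvSeq number u ≠ pvSeq number v := by
  intro u v huM huv heq
  have hM1 : 1 ≤ M := by omega
  set p := v - u with hp
  have hp1 : 1 ≤ p := by omega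
  have hper : pvSeq number u = pvSeq number (u + p) := by
    have : u + p = v := by omega
    rw [this]; exact heq
  -- step 1: c_{M-1} = c_{M-1+p}
  have s1 : pvSeq number (M - 1) = pvSeq number (M - 1 + p) := by
    have := pvPeriodic number hper 1 (M - 1) (by omega)
    simpa using this
  -- step 2: c_{M-1+p} = c_{M-1+p+K}
  have s2 : pvSeq number (M - 1 + p) = pvSeq number (M - 1 + p + K) := by
    have := pvShift number hM (p - 1)
    have e1 : M + (p - 1) = M - 1 + p := by omega
    have e2 : K + M + (p - 1) = M - 1 + p + K := by omega
    rwa [e1, e2] at this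
  -- step 3: c_{M-1+K} = c_{M-1+K+p}
  have s3 : pvSeq number (M - 1 + K) = pvSeq number (M - 1 + K + p) := by
    have := pvPeriodic number hper 1 (M - 1 + K) (by omega)
    simpa using this
  have e3 : M - 1 + p + K = M - 1 + K + p := by omega
  have : pvSeq number (M - 1) = pvSeq number (K + (M - 1)) := by
    rw [s1, s2, e3, ← s3]
    congr 1
    omega
  exact hMmin (M - 1) (by omega) this

-- the index of the first repeat equals max(M,1) + L
theorem pvFirstRepeat (number : Int) (K M L : Nat)
    (hM : pvSeq number M = pvSeq number (K + M))
    (hMmin : ∀ m, m < M → ¬ pvSeq number m = pvSeq number (K + m))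
    (hL : 1 ≤ L ∧ pvSeq number (M + L) = pvSeq number M)
    (hLmin : ∀ l, l < L → ¬ (1 ≤ l ∧ pvSeq number (M + l) = pvSeq number M))
    (r : Nat) (hr : pvRepAt number r) (hrmin : ∀ n, n < r → ¬ pvRepAt number n) :
    r = max M 1 + L := by
  have hcyc := pvCycleDistinct number M L hL hLmin
  have htail := pvTailDistinct number K M hM hMmin
  -- all of c_1 .. c_{max M 1 + L - 1} are pairwise distinct
  have hdist : ∀ u v, 1 ≤ u → u < v → v ≤ max M 1 + L - 1 →
      pvSeq number u ≠ pvSeq number v := by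
    intro u v hu huv hv heq
    rcases Nat.lt_or_ge u M with huM | huM
    · exact htail u v huM huv heq
    · rcases Nat.lt_or_ge M 1 with hM0 | hM1
      · -- M = 0, so u v ∈ [1, L]
        have hM0' : M = 0 := by omega
        rcases Nat.lt_or_ge v L with hvL | hvL
        · refine hcyc u v huv hvL ?_
          have e1 : M + u = u := by omega
          have e2 : M + v = v := by omega
          rw [e1, e2]; exact heq
        · -- v = L, and c_L = c_0
          have hvL' : v = L := by omega
          have h1 : pvSeq number L = pvSeq number 0 := by
            have h := hL.2; rwa [hM0', Nat.zero_add] at h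
          refine hcyc 0 u (by omega) (by omega) ?_
          have e1 : M + 0 = 0 := by omega
          have e2 : M + u = u := by omega
          rw [e1, e2, ← h1, ← hvL']
          exact heq.symm
      · -- M ≥ 1, so u v ∈ [M, M + L - 1]
        refine hcyc (u - M) (v - M) (by omega) (by omega) ?_
        have e1 : M + (u - M) = u := by omega
        have e2 : M + (v - M) = v := by omega
        rw [e1, e2]; exact heq
  -- there is a repeat at index max M 1 + L
  have hrep : pvRepAt number (max M 1 + L) := by
    refine ⟨max M 1, by omega, by omega, ?_⟩
    rcases Nat.lt_or_ge M 1 with hM0 | hM1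
    · have hM0' : M = 0 := by omega
      have h1 : pvSeq number 0 = pvSeq number L := by
        have h := hL.2; rw [hM0', Nat.zero_add] at h; exact h.symm
      have h2 := pvShift number h1 1
      have e1 : max M 1 = 1 := by omega
      rw [e1, show (1 : Nat) + L = L + 1 by omega]
      simpa using h2
    · have e3 : max M 1 = M := by omega
      rw [e3]
      exact hL.2.symm
  -- conclude by minimality on both sides
  have h1 : ¬ (max M 1 + L < r) := fun h => hrmin _ h hrep
  have h2 : ¬ (r < max M 1 + L) := by
    intro h
    obtain ⟨j, hj1, hj2, hj3⟩ := hr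
    exact hdist j r hj2 hj1 (by omega) hj3
  omega

-- existence of the meet index K with its bound
theorem pvExistsK (number : Int) :
    ∃ k, (1 ≤ k ∧ pvSeq number k = pvSeq number (2 * k)) ∧ k ≤ 16777217 := by
  obtain ⟨i, j, hi1, hij, hj, hseq⟩ := pvCollision number
  set p := j - i with hp
  have hp1 : 1 ≤ p := by omega
  have hper : pvSeq number i = pvSeq number (i + p) := by
    have e : i + p = j := by omega
    rw [e]; exact hseq
  refine ⟨i / p * p + p, ⟨le_trans hp1 (Nat.le_add_left p _), ?_⟩,
    le_trans (Nat.add_le_add_right (Nat.div_mul_le_self i p) p) (by omega)⟩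
  have hik : i < i / p * p + p := by
    calc i = p * (i / p) + i % p := (Nat.div_add_mod i p).symm
      _ < p * (i / p) + p := Nat.add_lt_add_left (Nat.mod_lt i (by omega)) _
      _ = i / p * p + p := by rw [Nat.mul_comm]
  have h := pvPeriodic number hper (i / p + 1) (i / p * p + p) (le_of_lt hik)
  have e : i / p * p + p + (i / p + 1) * p = 2 * (i / p * p + p) := by ring
  rwa [e] at h

-- ===== VERDICT (by name: the statement is the Claim_ definition above) =====
theorem register_0_spec : Claim_equal_register_0 := by
  intro number is_part_1 _
  unfold Spec_register_0 register_0 register_0_alt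
  cases is_part_1 with
  | true =>
    have h : (16777217 : Nat) = 16777216 + 1 := rfl
    rw [h, registerOuterA]
    simp only [if_true]
    exact advance_eq 0 number (by norm_num) (by norm_num)
  | false =>
    simp only [Bool.false_eq_true, if_false]
    -- least meet index K
    letI : DecidablePred (fun k => 1 ≤ k ∧ pvSeq number k = pvSeq number (2 * k)) :=
      fun _ => Classical.propDecidable _
    obtain ⟨k0, hk0, hk0b⟩ := pvExistsK number
    have hKex : ∃ k, 1 ≤ k ∧ pvSeq number k = pvSeq number (2 * k) := ⟨k0, hk0⟩
    set K := Nat.find hKex with hKdef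
    have hK := Nat.find_spec hKex
    have hKmin : ∀ k, k < K → ¬ (1 ≤ k ∧ pvSeq number k = pvSeq number (2 * k)) :=
      fun k h => Nat.find_min hKex h
    have hKb : K ≤ 16777217 := le_trans (Nat.find_min' hKex hk0) hk0b
    -- least preperiod M
    letI : DecidablePred (fun m => pvSeq number m = pvSeq number (K + m)) :=
      fun _ => Classical.propDecidable _
    have hMex : ∃ m, pvSeq number m = pvSeq number (K + m) := ⟨K, by
      have h := hK.2; rwa [show 2 * K = K + K by ring] at h⟩
    set M := Nat.find hMex with hMdef
    have hM := Nat.find_spec hMex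
    have hMmin : ∀ m, m < M → ¬ pvSeq number m = pvSeq number (K + m) :=
      fun m h => Nat.find_min hMex h
    have hMb : M ≤ K := Nat.find_min' hMex (by
      have h := hK.2; rwa [show 2 * K = K + K by ring] at h)
    -- least period L
    letI : DecidablePred (fun l => 1 ≤ l ∧ pvSeq number (M + l) = pvSeq number M) :=
      fun _ => Classical.propDecidable _
    have hLex : ∃ l, 1 ≤ l ∧ pvSeq number (M + l) = pvSeq number M := ⟨K, hK.1, by
      have h := hM; rw [show K + M = M + K by ring] at h; exact h.symm⟩
    set L := Nat.find hLex with hLdef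
    have hL := Nat.find_spec hLex
    have hLmin : ∀ l, l < L → ¬ (1 ≤ l ∧ pvSeq number (M + l) = pvSeq number M) :=
      fun l h => Nat.find_min hLex h
    have hLb : L ≤ K := Nat.find_min' hLex ⟨hK.1, by
      have h := hM; rw [show K + M = M + K by ring] at h; exact h.symm⟩
    -- least repeat index r
    letI : DecidablePred (pvRepAt number) := fun _ => Classical.propDecidable _
    have hrex : ∃ n, pvRepAt number n := by
      obtain ⟨i, j, hi1, hij, hj, hseq⟩ := pvCollision number
      exact ⟨j, i, hij, hi1, hseq⟩
    set r := Nat.find hrex with hrdef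
    have hr := Nat.find_spec hrex
    have hrmin : ∀ n, n < r → ¬ pvRepAt number n := fun n h => Nat.find_min hrex h
    -- A's side
    have hA : registerOuterA number false 16777217 PySem.Set.empty 0 (-1)
        = pvSeq number (r - 1) := by
      have hrb : r ≤ 16777217 := by
        obtain ⟨i, j, hi1, hij, hj, hseq⟩ := pvCollision number
        exact le_trans (Nat.find_min' hrex ⟨i, hij, hi1, hseq⟩) hj
      refine pvOuterChar number r hr hrmin 16777217 0 PySem.Set.empty (-1) ?_ ?_ ?_ ?_
      · intro x
        constructor
        · intro h; exact absurd h List.not_mem_nil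
        · rintro ⟨j, h1, h2, _⟩; omega
      · intro h; omega
      · obtain ⟨j, hj1, hj2, _⟩ := hr; omega
      · omega
    -- B's three loops return pvSeq K, (pvSeq M, M), L
    have hmeet : floydMeet number 16777217 (registerAdvanceB 0 number)
        (registerAdvanceB (registerAdvanceB 0 number) number) = pvSeq number K :=
      pvMeetChar number K hK hKmin 16777217 1 (by omega) hK.1 (by omega)
    have hmu : floydMu number 16777217 0 (pvSeq number K) 0 = (pvSeq number M, M) :=
      pvMuChar number K M hM hMmin 16777217 0 (by omega) (by omega)
    have hlam : floydLam number 16777217 (registerAdvanceB (pvSeq number M) number)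
        (pvSeq number M) 1 = L :=
      pvLamChar number M L hL hLmin 16777217 1 (le_refl _) hL.1 (by omega)
    have hreq : r = max M 1 + L := pvFirstRepeat number K M L hM hMmin hL hLmin r hr hrmin
    simp only [hmeet, hmu, hlam]
    have hsteps : r - 1 = max M 1 + L - 1 := by omega
    rw [hA, hsteps, pvSeq_iterate]
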